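-- pv_equiv track=rewrite | github.com/arjit05/FinGuard-RAG | backend/pipeline/guardrails.py | _no_competitor_mention
-- ===== SOURCE A (Python) =====
-- _COMPETITOR_NAMES = [
--     "hdfc", "icici", "kotak", "paytm", "axis bank", "yes bank",
--     "indusind", "bajaj finserv", "policybazaar", "groww", "zerodha",
-- ]
--
-- def _no_competitor_mention(response: str, retrieved_chunks: list[str] | None = None) -> bool:
--     lower = response.lower()
--     for name in _COMPETITOR_NAMES:
--         if name in lower:
--             if retrieved_chunks and any(name in chunk.lower() for chunk in retrieved_chunks):
--                 continue
--             return False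
--     return True
-- ===== SOURCE B (Python) =====
-- _COMPETITOR_NAMES = [
--     "hdfc", "icici", "kotak", "paytm", "axis bank", "yes bank",
--     "indusind", "bajaj finserv", "policybazaar", "groww", "zerodha",
-- ]
--
-- def _no_competitor_mention(response: str, retrieved_chunks: list[str] | None = None) -> bool:
--     # Chunk-first coverage index: one pass over the retrieved chunks builds the set of
--     # competitor names they license; the response is then checked against that index.
--     allowed = set()
--     for chunk in (retrieved_chunks or []):
--         c = chunk.lower()
--         for name in _COMPETITOR_NAMES:
--             if name in c:
--                 allowed.add(name)
--     lower = response.lower()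
--     return all(name in allowed for name in _COMPETITOR_NAMES if name in lower)
-- ===== Notes on version B (the rewrite author's own statement) =====
-- stated objective: alternative
-- what changed: Inverts the traversal: instead of A's response-driven loop over names with an early return and a chunk scan per mentioned name, B makes one chunk-first pass that builds a coverage index (the set of competitor names appearing in any retrieved chunk, computed without looking at the response) and then checks every name mentioned in the response against that index.
import Mathlib
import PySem

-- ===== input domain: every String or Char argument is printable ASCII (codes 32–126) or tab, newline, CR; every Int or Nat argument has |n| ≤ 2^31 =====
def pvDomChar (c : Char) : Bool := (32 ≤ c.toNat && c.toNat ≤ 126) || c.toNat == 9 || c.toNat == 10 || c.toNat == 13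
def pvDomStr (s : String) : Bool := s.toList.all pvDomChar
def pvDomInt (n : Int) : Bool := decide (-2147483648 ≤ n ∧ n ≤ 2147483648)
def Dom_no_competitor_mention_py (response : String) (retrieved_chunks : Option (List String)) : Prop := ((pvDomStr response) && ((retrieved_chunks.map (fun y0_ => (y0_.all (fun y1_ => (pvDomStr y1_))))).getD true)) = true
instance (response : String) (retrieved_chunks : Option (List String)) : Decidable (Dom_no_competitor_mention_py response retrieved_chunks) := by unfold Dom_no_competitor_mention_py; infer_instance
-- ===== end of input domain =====

-- B inverts the traversal: a chunk-first pass builds the set of names covered by any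
-- retrieved chunk (independent of the response); every name mentioned in the response is
-- then checked against that index (alternative decomposition, same asymptotic cost).


def competitorNames : List String :=
  ["hdfc", "icici", "kotak", "paytm", "axis bank", "yes bank",
   "indusind", "bajaj finserv", "policybazaar", "groww", "zerodha"]

-- ===== PORT A =====
-- truthiness of `retrieved_chunks and any(name in chunk.lower() for chunk in retrieved_chunks)`
def covered (retrieved_chunks : Option (List String)) (name : String) : Bool :=
  match retrieved_chunks with
  | none => false
  | some chunks => !chunks.isEmpty && chunks.any (fun c => PySem.Str.isIn name (PySem.Str.lower c))

-- the for-loop with early `return False` / `continue`, as structural recursion over the names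
def noCompLoopA (lower : String) (retrieved_chunks : Option (List String)) : List String → Bool
  | [] => true
  | name :: rest =>
    if PySem.Str.isIn name lower then
      if covered retrieved_chunks name then noCompLoopA lower retrieved_chunks rest
      else false
    else noCompLoopA lower retrieved_chunks rest

def no_competitor_mention_py (response : String) (retrieved_chunks : Option (List String)) : Bool :=
  noCompLoopA (PySem.Str.lower response) retrieved_chunks competitorNames

-- ===== PORT B =====
-- `allowed.add(name)` inside the nested for-loops over `(retrieved_chunks or [])` and the names
def addCovered (c : String) (s : PySem.Set String) : PySem.Set String :=
  competitorNames.foldl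
    (fun s name => if PySem.Str.isIn name c then PySem.Set.add s name else s) s

def no_competitor_mention_py_alt (response : String) (retrieved_chunks : Option (List String)) : Bool :=
  let allowed : PySem.Set String :=
    (retrieved_chunks.getD []).foldl
      (fun s chunk => addCovered (PySem.Str.lower chunk) s) PySem.Set.empty
  let lower := PySem.Str.lower response
  (competitorNames.filter (fun name => PySem.Str.isIn name lower)).all
    (fun name => PySem.Set.contains allowed name)

-- ===== PRECONDITION & SPEC =====
def Spec_no_competitor_mention_py (response : String) (retrieved_chunks : Option (List String)) (out : Bool) : Prop := out = no_competitor_mention_py_alt response retrieved_chunks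
instance (response : String) (retrieved_chunks : Option (List String)) (out : Bool) : Decidable (Spec_no_competitor_mention_py response retrieved_chunks out) := by unfold Spec_no_competitor_mention_py; infer_instance

-- ===== CLAIM (what is proved, stated in full; the proofs are below) =====
def Claim_equal_no_competitor_mention_py : Prop := ∀ (response : String) (retrieved_chunks : Option (List String)), Dom_no_competitor_mention_py response retrieved_chunks → Spec_no_competitor_mention_py response retrieved_chunks (no_competitor_mention_py response retrieved_chunks)

-- ===== LEMMAS AND PROOFS =====

theorem noCompLoopA_eq_all_filter (lower : String) (rc : Option (List String)) (names : List String) :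
    noCompLoopA lower rc names = (names.filter (fun n => PySem.Str.isIn n lower)).all (covered rc) := by
  induction names with
  | nil => rfl
  | cons name rest ih =>
    cases h : PySem.Str.isIn name lower with
    | false =>
      simp only [noCompLoopA, List.filter_cons, h, Bool.false_eq_true, if_false, ih]
    | true =>
      simp only [noCompLoopA, List.filter_cons, h, if_true, List.all_cons]
      cases hc : covered rc name with
      | false => simp
      | true => simp [ih]

theorem mem_addCovered (c : String) (s : PySem.Set String) (y : String) :
    y ∈ addCovered c s ↔ y ∈ s ∨ (y ∈ competitorNames ∧ PySem.Str.isIn y c = true) := by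
  unfold addCovered
  generalize competitorNames = names
  induction names generalizing s with
  | nil => simp
  | cons n rest ih =>
    simp only [List.foldl_cons, List.mem_cons, ih]
    split
    · next h =>
      rw [PySem.Set.mem_add]
      constructor
      · rintro ((hs | rfl) | ⟨hy, hc⟩)
        · exact Or.inl hs
        · exact Or.inr ⟨Or.inl rfl, h⟩
        · exact Or.inr ⟨Or.inr hy, hc⟩
      · rintro (hs | ⟨rfl | hy, hc⟩)
        · exact Or.inl (Or.inl hs)
        · exact Or.inl (Or.inr rfl)
        · exact Or.inr ⟨hy, hc⟩
    · next h =>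
      constructor
      · rintro (hs | ⟨hy, hc⟩)
        · exact Or.inl hs
        · exact Or.inr ⟨Or.inr hy, hc⟩
      · rintro (hs | ⟨rfl | hy, hc⟩)
        · exact Or.inl hs
        · exact absurd hc h
        · exact Or.inr ⟨hy, hc⟩

theorem mem_allowed (chunks : List String) (s : PySem.Set String) (y : String) :
    y ∈ chunks.foldl (fun s chunk => addCovered (PySem.Str.lower chunk) s) s ↔
      y ∈ s ∨ (y ∈ competitorNames ∧ ∃ c ∈ chunks, PySem.Str.isIn y (PySem.Str.lower c) = true) := by
  induction chunks generalizing s with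
  | nil => simp
  | cons c rest ih =>
    simp only [List.foldl_cons, ih, mem_addCovered, List.mem_cons]
    constructor
    · rintro ((hs | ⟨hy, hc⟩) | ⟨hy, d, hd, hdc⟩)
      · exact Or.inl hs
      · exact Or.inr ⟨hy, c, Or.inl rfl, hc⟩
      · exact Or.inr ⟨hy, d, Or.inr hd, hdc⟩
    · rintro (hs | ⟨hy, d, (rfl | hd), hdc⟩)
      · exact Or.inl (Or.inl hs)
      · exact Or.inl (Or.inr ⟨hy, hdc⟩)
      · exact Or.inr ⟨hy, d, hd, hdc⟩

theorem contains_allowed_eq_covered (rc : Option (List String)) (name : String)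
    (hn : name ∈ competitorNames) :
    PySem.Set.contains
      ((rc.getD []).foldl (fun s chunk => addCovered (PySem.Str.lower chunk) s) PySem.Set.empty)
      name = covered rc name := by
  rw [Bool.eq_iff_iff, PySem.Set.contains_iff, mem_allowed]
  cases rc with
  | none => simp [covered, PySem.Set.empty]
  | some chunks =>
    cases chunks with
    | nil => simp [covered, PySem.Set.empty]
    | cons c cs =>
      simp only [Option.getD_some, covered, List.isEmpty_cons, Bool.not_false, Bool.true_and,
        List.any_eq_true, PySem.Set.empty]
      constructor
      · rintro (h | ⟨_, hex⟩)
        · simp at h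
        · exact hex
      · intro hex; exact Or.inr ⟨hn, hex⟩

theorem all_congr_mem {α : Type} {l : List α} {p q : α → Bool} (h : ∀ a ∈ l, p a = q a) :
    l.all p = l.all q := by
  induction l with
  | nil => rfl
  | cons a t ih =>
    simp only [List.all_cons, h a (by simp), ih (fun b hb => h b (by simp [hb]))]

theorem alt_eq_all_filter (response : String) (rc : Option (List String)) :
    no_competitor_mention_py_alt response rc
      = (competitorNames.filter (fun n => PySem.Str.isIn n (PySem.Str.lower response))).all
          (covered rc) := by
  unfold no_competitor_mention_py_alt
  exact all_congr_mem (fun name hname =>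
    contains_allowed_eq_covered rc name (List.mem_of_mem_filter hname))

-- ===== VERDICT (by name: the statement is the Claim_ definition above) =====
theorem no_competitor_mention_py_spec : Claim_equal_no_competitor_mention_py := by
  intro response rc _
  unfold Spec_no_competitor_mention_py no_competitor_mention_py
  rw [noCompLoopA_eq_all_filter, alt_eq_all_filter]
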